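-- pv_equiv track=rewrite | github.com/IndraPur1/Algorithm-Analysis-and-Strategy | Pertemuan 3/TheLostTreasure.py | Treasure
-- ===== SOURCE A (Python) =====
-- def Treasure(S, kiri, kanan):
--     if kiri == kanan:
--         return S[kiri]
--
--     mid = (kiri + kanan) // 2
--
--     maxkiri = Treasure(S, kiri, mid)
--     maxkanan = Treasure(S, mid + 1, kanan)
--
--     if maxkiri > maxkanan:
--         return maxkiri
--     else:
--         return maxkanan
-- ===== SOURCE B (Python) =====
-- def Treasure(S, kiri, kanan):
--     maxval = S[kiri]
--     for i in range(kiri + 1, kanan + 1):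
--         if S[i] > maxval:
--             maxval = S[i]
--     return maxval
-- ===== Notes on version B (the rewrite author's own statement) =====
-- stated objective: simpler
-- what changed: Replaces the divide-and-conquer recursion (split at midpoint, recurse on both halves, combine with >) by a single iterative linear scan keeping a running maximum over the inclusive index range.
import Mathlib
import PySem

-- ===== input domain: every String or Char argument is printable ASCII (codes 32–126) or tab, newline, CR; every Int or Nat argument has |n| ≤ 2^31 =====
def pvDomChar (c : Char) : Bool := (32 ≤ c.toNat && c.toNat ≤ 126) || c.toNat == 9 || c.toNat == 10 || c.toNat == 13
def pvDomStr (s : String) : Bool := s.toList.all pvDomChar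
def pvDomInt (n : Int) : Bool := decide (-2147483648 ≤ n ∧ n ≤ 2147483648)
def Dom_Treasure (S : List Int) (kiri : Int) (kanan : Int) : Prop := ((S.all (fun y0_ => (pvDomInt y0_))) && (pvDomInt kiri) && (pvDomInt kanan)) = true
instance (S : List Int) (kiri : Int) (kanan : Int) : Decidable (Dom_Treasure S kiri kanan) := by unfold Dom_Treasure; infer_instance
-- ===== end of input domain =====

-- B replaces A's divide-and-conquer recursion by a single left-to-right scan with a
-- running maximum over the same inclusive index range; same value on every input of Pre_.

-- S[i] (Python indexing, negative wrap); the .getD 0 default is unreachable under Pre_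
-- (an out-of-range index would be an IndexError in Python, excluded by Pre_).
def pvG (S : List Int) (i : Int) : Int := (PySem.List.pyGet? S i).getD 0

-- ===== PORT A =====
-- fuel only totalizes the recursion; (kanan - kiri).toNat + 1 always suffices under Pre_
def TreasureFuel (fuel : Nat) (S : List Int) (kiri : Int) (kanan : Int) : Int :=
  match fuel with
  | 0 => 0
  | Nat.succ f =>
    if kiri = kanan then pvG S kiri
    else
      let mid := PySem.Int.floordiv (kiri + kanan) 2
      let maxkiri := TreasureFuel f S kiri mid
      let maxkanan := TreasureFuel f S (mid + 1) kanan
      if maxkiri > maxkanan then maxkiri else maxkanan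

def Treasure (S : List Int) (kiri : Int) (kanan : Int) : Int :=
  TreasureFuel ((kanan - kiri).toNat + 1) S kiri kanan

-- ===== PORT B =====
def Treasure_alt (S : List Int) (kiri : Int) (kanan : Int) : Int :=
  (PySem.List.pyRange (kiri + 1) (kanan + 1) 1).foldl
    (fun maxval i => if pvG S i > maxval then pvG S i else maxval) (pvG S kiri)

-- ===== PRECONDITION & SPEC =====
-- Pre_: exactly the inputs where Python A returns: a valid (possibly negative, Python-style)
-- inclusive index range; kiri > kanan makes A recurse forever (RecursionError), an index
-- outside [-len, len) raises IndexError.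
def Pre_Treasure (S : List Int) (kiri : Int) (kanan : Int) : Prop :=
  -(S.length : Int) ≤ kiri ∧ kiri ≤ kanan ∧ kanan < (S.length : Int)
instance (S : List Int) (kiri : Int) (kanan : Int) : Decidable (Pre_Treasure S kiri kanan) := by
  unfold Pre_Treasure; infer_instance

def pvWitness_Treasure : List Int × Int × Int := ([3, 1, 4, 1, 5], 1, 4)

def Spec_Treasure (S : List Int) (kiri : Int) (kanan : Int) (out : Int) : Prop := out = Treasure_alt S kiri kanan
instance (S : List Int) (kiri : Int) (kanan : Int) (out : Int) : Decidable (Spec_Treasure S kiri kanan out) := by unfold Spec_Treasure; infer_instance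

-- ===== CLAIM (what is proved, stated in full; the proofs are below) =====
def Claim_equal_Treasure : Prop := ∀ (S : List Int) (kiri : Int) (kanan : Int), Dom_Treasure S kiri kanan → Pre_Treasure S kiri kanan → Spec_Treasure S kiri kanan (Treasure S kiri kanan)

-- ===== LEMMAS AND PROOFS =====

lemma pv_step_eq_max (S : List Int) :
    (fun (maxval i : Int) => if pvG S i > maxval then pvG S i else maxval)
      = fun maxval i => max maxval (pvG S i) := by
  funext m i; split_ifs <;> omega

lemma pv_foldl_max_assoc (f : Int → Int) (l : List Int) :
    ∀ a b : Int, List.foldl (fun m i => max m (f i)) (max a b) l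
      = max a (List.foldl (fun m i => max m (f i)) b l) := by
  induction l with
  | nil => intro a b; rfl
  | cons x xs ih =>
    intro a b
    simp only [List.foldl_cons, max_assoc]
    exact ih a (max b (f x))

lemma pv_alt_eq_foldmax (S : List Int) (kiri kanan : Int) :
    Treasure_alt S kiri kanan
      = (PySem.List.pyRange (kiri + 1) (kanan + 1) 1).foldl
          (fun m i => max m (pvG S i)) (pvG S kiri) := by
  unfold Treasure_alt; rw [pv_step_eq_max]

lemma pv_alt_single (S : List Int) (kiri : Int) :
    Treasure_alt S kiri kiri = pvG S kiri := by
  unfold Treasure_alt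
  rw [PySem.List.pyRange_one_eq_nil (le_refl (kiri + 1))]; rfl

lemma pv_alt_split (S : List Int) (kiri mid kanan : Int)
    (h1 : kiri ≤ mid) (h2 : mid < kanan) :
    Treasure_alt S kiri kanan
      = max (Treasure_alt S kiri mid) (Treasure_alt S (mid + 1) kanan) := by
  rw [pv_alt_eq_foldmax, pv_alt_eq_foldmax, pv_alt_eq_foldmax]
  rw [PySem.List.pyRange_one_append (kiri + 1) (mid + 1) (kanan + 1) (by omega) (by omega)]
  rw [List.foldl_append]
  rw [PySem.List.pyRange_one_cons (show mid + 1 < kanan + 1 by omega)]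
  rw [List.foldl_cons]
  exact pv_foldl_max_assoc _ _ _ _

lemma pv_fuel_ok : ∀ (f : Nat) (S : List Int) (kiri kanan : Int),
    kiri ≤ kanan → (kanan - kiri).toNat < f →
    TreasureFuel f S kiri kanan = Treasure_alt S kiri kanan := by
  intro f
  induction f with
  | zero => intro S kiri kanan _ hf; omega
  | succ f ih =>
    intro S kiri kanan hle hf
    by_cases h : kiri = kanan
    · subst h
      simp only [TreasureFuel]
      exact (pv_alt_single S kiri).symm
    · have hlt : kiri < kanan := lt_of_le_of_ne hle h
      have hm1 : kiri ≤ PySem.Int.floordiv (kiri + kanan) 2 :=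
        (PySem.Int.floordiv_two_mid_bounds hle).1
      have hm2 : PySem.Int.floordiv (kiri + kanan) 2 < kanan := by
        rw [PySem.Int.floordiv_lt_iff_lt_mul (by omega)]; omega
      simp only [TreasureFuel, if_neg h]
      rw [ih S kiri _ hm1 (by omega), ih S _ kanan (by omega) (by omega)]
      rw [pv_alt_split S kiri _ kanan hm1 hm2]
      split_ifs <;> omega

-- ===== VERDICT (by name: the statement is the Claim_ definition above) =====
theorem Treasure_spec : Claim_equal_Treasure := by
  intro S kiri kanan _ hpre
  unfold Spec_Treasure Treasure
  exact pv_fuel_ok _ S kiri kanan hpre.2.1 (by omega)
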